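-- pv_equiv track=rewrite | github.com/hadleybcarr/temp | yolo.py | max_consecutive_run
-- ===== SOURCE A (Python) =====
-- def max_consecutive_run(frame_ids, gap_tolerance=2):
--     if not frame_ids: return 0
--     longest = current = 1
--     for prev, curr in zip(frame_ids, frame_ids[1:]):
--         if curr - prev <= gap_tolerance:
--             current += 1
--             longest = max(longest, current)
--         else:
--             current = 1
--
--     return longest
-- ===== SOURCE B (Python) =====
-- def max_consecutive_run(frame_ids, gap_tolerance=2):
--     # Segment decomposition: repeatedly split off the leading maximal run
--     # of frames within gap tolerance, keep the longest segment length.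
--     def split_first_run(xs):
--         k = 1
--         while k < len(xs) and xs[k] - xs[k-1] <= gap_tolerance:
--             k += 1
--         return k, xs[k:]
--     best = 0
--     rest = frame_ids
--     while rest:
--         k, rest = split_first_run(rest)
--         best = max(best, k)
--     return best
-- ===== Notes on version B (the rewrite author's own statement) =====
-- stated objective: alternative
-- what changed: Replaces A's streaming scan with a running-max/current-counter state by a segment decomposition that repeatedly splits off the leading maximal within-tolerance run and takes the longest segment length.
import Mathlib
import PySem

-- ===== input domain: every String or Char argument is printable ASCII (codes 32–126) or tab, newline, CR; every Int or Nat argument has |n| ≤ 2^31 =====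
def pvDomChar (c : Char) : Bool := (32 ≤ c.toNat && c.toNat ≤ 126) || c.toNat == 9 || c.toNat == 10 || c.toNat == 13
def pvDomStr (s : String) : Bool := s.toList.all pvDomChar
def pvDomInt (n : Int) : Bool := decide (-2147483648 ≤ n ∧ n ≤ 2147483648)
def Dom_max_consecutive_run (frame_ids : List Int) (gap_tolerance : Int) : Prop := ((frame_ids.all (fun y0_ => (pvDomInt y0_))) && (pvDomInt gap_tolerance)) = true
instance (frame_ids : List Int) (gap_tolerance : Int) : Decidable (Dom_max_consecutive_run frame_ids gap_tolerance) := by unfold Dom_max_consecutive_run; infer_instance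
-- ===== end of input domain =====

-- B is an alternative segment-splitting decomposition of the same O(n) task (no speed claim).

-- ===== PORT A =====
-- A's for-loop over zip(frame_ids, frame_ids[1:]) with state (longest, current),
-- transliterated as structural recursion carrying prev.
def pvLoopA (g longest current prev : Int) : List Int → Int
  | [] => longest
  | curr :: rest =>
    if curr - prev ≤ g then pvLoopA g (max longest (current + 1)) (current + 1) curr rest
    else pvLoopA g longest 1 curr rest

def max_consecutive_run (frame_ids : List Int) (gap_tolerance : Int) : Int :=
  match frame_ids with
  | [] => 0
  | x :: xs => pvLoopA gap_tolerance 1 1 x xs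

-- ===== PORT B =====
-- split_first_run: returns the number of EXTENSIONS beyond the head (Python's k minus 1)
-- together with the remaining suffix; the head itself is counted at the use site (p.1 + 1 = Python's k).
def pvSplitRun (g prev : Int) : List Int → Int × List Int
  | [] => (0, [])
  | y :: ys =>
    if y - prev ≤ g then
      let p := pvSplitRun g y ys
      (p.1 + 1, p.2)
    else (0, y :: ys)

lemma pvSplitRun_len (g prev : Int) : ∀ xs : List Int, (pvSplitRun g prev xs).2.length ≤ xs.length := by
  intro xs
  induction xs generalizing prev with
  | nil => simp [pvSplitRun]
  | cons y ys ih =>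
    simp only [pvSplitRun]
    split
    · exact le_trans (ih y) (Nat.le_succ _)
    · simp

-- the outer while-rest loop of B: peel off the leading run, keep the max segment length
def max_consecutive_run_alt (frame_ids : List Int) (gap_tolerance : Int) : Int :=
  match frame_ids with
  | [] => 0
  | x :: xs =>
    let p := pvSplitRun gap_tolerance x xs
    max (p.1 + 1) (max_consecutive_run_alt p.2 gap_tolerance)
termination_by frame_ids.length
decreasing_by
  exact Nat.lt_succ_of_le (pvSplitRun_len gap_tolerance x xs)

-- ===== PRECONDITION & SPEC =====
def Spec_max_consecutive_run (frame_ids : List Int) (gap_tolerance : Int) (out : Int) : Prop := out = max_consecutive_run_alt frame_ids gap_tolerance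
instance (frame_ids : List Int) (gap_tolerance : Int) (out : Int) : Decidable (Spec_max_consecutive_run frame_ids gap_tolerance out) := by unfold Spec_max_consecutive_run; infer_instance

-- ===== CLAIM (what is proved, stated in full; the proofs are below) =====
def Claim_equal_max_consecutive_run : Prop := ∀ (frame_ids : List Int) (gap_tolerance : Int), Dom_max_consecutive_run frame_ids gap_tolerance → Spec_max_consecutive_run frame_ids gap_tolerance (max_consecutive_run frame_ids gap_tolerance)

-- ===== LEMMAS AND PROOFS =====

lemma pvSplitRun_nonneg (g prev : Int) : ∀ xs : List Int, 0 ≤ (pvSplitRun g prev xs).1 := by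
  intro xs
  induction xs generalizing prev with
  | nil => simp [pvSplitRun]
  | cons y ys ih =>
    simp only [pvSplitRun]
    split
    · have := ih y; omega
    · simp

-- the main invariant: A's loop from state (L, c) computes the max of L, the completed
-- current run (c + extensions), and the best of the remaining segments
lemma pvLoopA_eq (g : Int) : ∀ (xs : List Int) (prev L c : Int), 1 ≤ c → c ≤ L →
    pvLoopA g L c prev xs =
      max L (max (c + (pvSplitRun g prev xs).1)
                 (max_consecutive_run_alt (pvSplitRun g prev xs).2 g)) := by
  intro xs
  induction xs with
  | nil =>
    intro prev L c hc hcL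
    simp only [pvLoopA, pvSplitRun, max_consecutive_run_alt]
    omega
  | cons y ys ih =>
    intro prev L c hc hcL
    simp only [pvLoopA, pvSplitRun]
    by_cases h : y - prev ≤ g
    · simp only [if_pos h]
      have hk := pvSplitRun_nonneg g y ys
      rw [ih y (max L (c + 1)) (c + 1) (by omega) (by omega)]
      omega
    · simp only [if_neg h]
      rw [ih y L 1 le_rfl (by omega)]
      have hrw : max_consecutive_run_alt (y :: ys) g =
          max ((pvSplitRun g y ys).1 + 1) (max_consecutive_run_alt (pvSplitRun g y ys).2 g) := by
        rw [max_consecutive_run_alt]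
      rw [hrw]
      omega

-- ===== VERDICT (by name: the statement is the Claim_ definition above) =====
theorem max_consecutive_run_spec : Claim_equal_max_consecutive_run := by
  intro frame_ids gap_tolerance _
  unfold Spec_max_consecutive_run
  match frame_ids with
  | [] => rw [max_consecutive_run, max_consecutive_run_alt]
  | x :: xs =>
    rw [max_consecutive_run, max_consecutive_run_alt]
    rw [pvLoopA_eq gap_tolerance xs x 1 1 le_rfl le_rfl]
    have hk := pvSplitRun_nonneg gap_tolerance x xs
    omega
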